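-- pv_equiv track=rewrite | github.com/cirosantilli/project-euler-solutions | solvers/771.py | count_regular
-- ===== SOURCE A (Python) =====
-- def iroot4(n: int) -> int:
--     x = int(n**0.25)
--     while (x + 1) ** 4 <= n:
--         x += 1
--     while x**4 > n:
--         x -= 1
--     return x
--
-- def seq_len_limit(a0: int, a1: int, m: int, s: int, n: int) -> int:
--     length = 2
--     prev, cur = a0, a1
--     while True:
--         nxt = m * cur + s * prev
--         if nxt > n:
--             break
--         prev, cur = cur, nxt
--         length += 1
--     return length
--
-- def count_seq_from_recurrence(a0: int, a1: int, m: int, s: int, n: int) -> int: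
--     length = seq_len_limit(a0, a1, m, s, n)
--     if length < 5:
--         return 0
--     return (length - 4) * (length - 3) // 2
--
-- def count_regular(n: int) -> int:
--     total = 0
--     # s = +1, m = 1 sequence starts at (1,2)
--     total += count_seq_from_recurrence(1, 2, 1, 1, n)
--
--     max_m = iroot4(n) + 2
--     # s = +1, m >= 2 sequences start at (1,m)
--     for m in range(2, max_m + 1):
--         length = seq_len_limit(1, m, m, 1, n)
--         if length >= 5:
--             total += (length - 4) * (length - 3) // 2
--
--     # s = +1, C=2 only for m=2, start (1,3)
--     total += count_seq_from_recurrence(1, 3, 2, 1, n)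
--
--     # s = -1, m >= 3 sequences start at (1,m)
--     for m in range(3, max_m + 1):
--         length = seq_len_limit(1, m, m, -1, n)
--         if length >= 5:
--             total += (length - 4) * (length - 3) // 2
--
--     # s = -1, extra sequences for m=3 and m=4
--     total += count_seq_from_recurrence(1, 2, 3, -1, n)
--     total += count_seq_from_recurrence(1, 3, 4, -1, n)
--     return total
-- ===== SOURCE B (Python) =====
-- def count_regular(n: int) -> int:
--     def mat_mul(X, Y):
--         a, b, c, d = X
--         e, f, g, h = Y
--         return (a * e + b * g, a * f + b * h, c * e + d * g, c * f + d * h)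
--
--     def mat_pow(M, e):
--         if e == 0:
--             return (1, 0, 0, 1)
--         if e % 2 == 0:
--             H = mat_pow(M, e // 2)
--             return mat_mul(H, H)
--         return mat_mul(M, mat_pow(M, e - 1))
--
--     def term(a0, a1, m, s, k):
--         # k-th element (k >= 2): top row of [[m,s],[1,0]]^(k-2) applied to (a1,a0)
--         p, q, _, _ = mat_pow((m, s, 1, 0), k - 2)
--         return p * a1 + q * a0
--
--     def seq_len(a0, a1, m, s):
--         # galloping upper bound, then binary search for the largest k with
--         # element #k <= n (k = 2 always counts)
--         hi = 3
--         while term(a0, a1, m, s, hi) <= n: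
--             hi *= 2
--         lo = 2
--         while hi - lo > 1:
--             mid = (lo + hi) // 2
--             if term(a0, a1, m, s, mid) <= n:
--                 lo = mid
--             else:
--                 hi = mid
--         return lo
--
--     def contrib(a0, a1, m, s):
--         length = seq_len(a0, a1, m, s)
--         if length < 5:
--             return 0
--         return (length - 4) * (length - 3) // 2
--
--     # largest x with x**4 <= n, by binary search
--     lo, hi = 0, n + 1
--     while hi - lo > 1:
--         mid = (lo + hi) // 2
--         if mid ** 4 <= n:
--             lo = mid
--         else:
--             hi = mid
--     max_m = lo + 2
--
--     seeds = [(1, 2, 1, 1)]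
--     seeds += [(1, m, m, 1) for m in range(2, max_m + 1)]
--     seeds.append((1, 3, 2, 1))
--     seeds += [(1, m, m, -1) for m in range(3, max_m + 1)]
--     seeds += [(1, 2, 3, -1), (1, 3, 4, -1)]
--     return sum(contrib(*t) for t in seeds)
-- ===== Notes on version B (the rewrite author's own statement) =====
-- stated objective: alternative
-- what changed: Instead of stepping each recurrence term by term and counting (A's linear scan per seed), B finds each sequence's length by galloping plus binary search on the index, computing the k-th element directly by fast binary exponentiation of the 2x2 matrix [[m,s],[1,0]], and computes the integer fourth root by binary search instead of a float guess with correction loops; the seed cases are driven from one seeds list.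
import Mathlib
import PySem

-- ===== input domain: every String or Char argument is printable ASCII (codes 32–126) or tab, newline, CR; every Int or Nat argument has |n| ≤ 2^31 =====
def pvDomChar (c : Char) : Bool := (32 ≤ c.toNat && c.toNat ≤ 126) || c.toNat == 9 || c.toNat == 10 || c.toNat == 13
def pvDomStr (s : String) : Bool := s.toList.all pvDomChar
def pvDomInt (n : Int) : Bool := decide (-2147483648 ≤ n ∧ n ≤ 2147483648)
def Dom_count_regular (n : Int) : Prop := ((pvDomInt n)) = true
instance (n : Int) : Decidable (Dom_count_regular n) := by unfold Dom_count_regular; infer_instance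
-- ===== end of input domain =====

-- B replaces A's linear scans by binary searches: the sequence length is found by
-- galloping + binary search on the index, with the k-th element computed directly via
-- fast matrix exponentiation of [[m,s],[1,0]], and the fourth root by binary search;
-- objective: alternative (same asymptotic cost on these tiny lengths).


-- ===== PORT A =====

-- x ** 4
def pow4 (x : Int) : Int := x * x * x * x

-- fuel for A's while loops (large enough on every admitted input; the lemmas below are
-- fuel-parametric, so the exact value never matters)
def pvFuel (n : Int) : Nat := n.toNat + 10

-- `while (x + 1) ** 4 <= n: x += 1`
def iroot4Up (n : Int) : Nat → Int → Int
  | 0, x => x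
  | f + 1, x => if pow4 (x + 1) ≤ n then iroot4Up n f (x + 1) else x

-- `while x ** 4 > n: x -= 1`
def iroot4Down (n : Int) : Nat → Int → Int
  | 0, x => x
  | f + 1, x => if pow4 x > n then iroot4Down n f (x - 1) else x

-- `int(n ** 0.25)`: the float initial guess is ported as the exact ⌊n^(1/4)⌋ (Nat.sqrt
-- twice); exact for the function's result because the two correction loops return the
-- floor fourth root from any integer start (the guess only affects iteration counts).
def iroot4 (n : Int) : Int :=
  iroot4Down n (pvFuel n) (iroot4Up n (pvFuel n) (Int.ofNat (Nat.sqrt (Nat.sqrt n.toNat))))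

-- the `while True` loop of seq_len_limit (`nxt` inlined)
def seqLoopA (n m s : Int) : Nat → Int → Int → Int → Int
  | 0, _, _, len => len
  | f + 1, prev, cur, len =>
    if m * cur + s * prev > n then len
    else seqLoopA n m s f cur (m * cur + s * prev) (len + 1)

def seq_len_limit (a0 a1 m s n : Int) : Int :=
  seqLoopA n m s (pvFuel n) a0 a1 2

def count_seq_from_recurrence (a0 a1 m s n : Int) : Int :=
  let length := seq_len_limit a0 a1 m s n
  if length < 5 then 0 else PySem.Int.floordiv ((length - 4) * (length - 3)) 2

def count_regular (n : Int) : Int :=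
  let total0 := count_seq_from_recurrence 1 2 1 1 n
  let max_m := iroot4 n + 2
  let total1 := (PySem.List.pyRange 2 (max_m + 1) 1).foldl (fun acc m =>
      let length := seq_len_limit 1 m m 1 n
      if length ≥ 5 then acc + PySem.Int.floordiv ((length - 4) * (length - 3)) 2 else acc) total0
  let total2 := total1 + count_seq_from_recurrence 1 3 2 1 n
  let total3 := (PySem.List.pyRange 3 (max_m + 1) 1).foldl (fun acc m =>
      let length := seq_len_limit 1 m m (-1) n
      if length ≥ 5 then acc + PySem.Int.floordiv ((length - 4) * (length - 3)) 2 else acc) total2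
  let total4 := total3 + count_seq_from_recurrence 1 2 3 (-1) n
  total4 + count_seq_from_recurrence 1 3 4 (-1) n

-- ===== PORT B =====

-- fuel for B's while loops / recursion depth (fuel-parametric lemmas below)
def pvFuelB (n : Int) : Nat := 2 * n.toNat + 8

-- mat_mul on 2x2 matrices (a, b, c, d) = [[a,b],[c,d]]
def mmulB (X Y : Int × Int × Int × Int) : Int × Int × Int × Int :=
  (X.1 * Y.1 + X.2.1 * Y.2.2.1, X.1 * Y.2.1 + X.2.1 * Y.2.2.2,
   X.2.2.1 * Y.1 + X.2.2.2 * Y.2.2.1, X.2.2.1 * Y.2.1 + X.2.2.2 * Y.2.2.2)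

-- mat_pow by halving; python's recursion on e ported with fuel ≥ e (depth ≤ e suffices)
def mpowB (fuel : Nat) (M : Int × Int × Int × Int) (e : Nat) : Int × Int × Int × Int :=
  match fuel with
  | 0 => (1, 0, 0, 1)
  | fuel + 1 =>
    if e = 0 then (1, 0, 0, 1)
    else if e % 2 = 0 then mmulB (mpowB fuel M (e / 2)) (mpowB fuel M (e / 2))
    else mmulB M (mpowB fuel M (e - 1))

-- term(a0, a1, m, s, k): top row of [[m,s],[1,0]]^(k-2) applied to (a1, a0)
def termB (a0 a1 m s k : Int) : Int :=
  let P := mpowB (k - 2).toNat (m, s, 1, 0) (k - 2).toNat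
  P.1 * a1 + P.2.1 * a0

-- `hi = 3; while term(..., hi) <= n: hi *= 2`
def gallopB (n a0 a1 m s : Int) : Nat → Int → Int
  | 0, hi => hi
  | f + 1, hi =>
    if termB a0 a1 m s hi ≤ n then gallopB n a0 a1 m s f (hi * 2) else hi

-- `while hi - lo > 1: mid = (lo+hi)//2; …` (the assignment `mid` inlined)
def bsLenB (n a0 a1 m s : Int) : Nat → Int → Int → Int
  | 0, lo, _ => lo
  | f + 1, lo, hi =>
    if hi - lo > 1 then
      if termB a0 a1 m s (PySem.Int.floordiv (lo + hi) 2) ≤ n then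
        bsLenB n a0 a1 m s f (PySem.Int.floordiv (lo + hi) 2) hi
      else bsLenB n a0 a1 m s f lo (PySem.Int.floordiv (lo + hi) 2)
    else lo

def seqLenB (n a0 a1 m s : Int) : Int :=
  bsLenB n a0 a1 m s (pvFuelB n) 2 (gallopB n a0 a1 m s (pvFuelB n) 3)

def contribB (n a0 a1 m s : Int) : Int :=
  let length := seqLenB n a0 a1 m s
  if length < 5 then 0 else PySem.Int.floordiv ((length - 4) * (length - 3)) 2

-- the root binary search `while hi - lo > 1: …` (`mid` inlined; mid ** 4 written out)
def bsRootB (n : Int) : Nat → Int → Int → Int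
  | 0, lo, _ => lo
  | f + 1, lo, hi =>
    if hi - lo > 1 then
      if (PySem.Int.floordiv (lo + hi) 2) * (PySem.Int.floordiv (lo + hi) 2) *
          (PySem.Int.floordiv (lo + hi) 2) * (PySem.Int.floordiv (lo + hi) 2) ≤ n then
        bsRootB n f (PySem.Int.floordiv (lo + hi) 2) hi
      else bsRootB n f lo (PySem.Int.floordiv (lo + hi) 2)
    else lo

def count_regular_alt (n : Int) : Int :=
  let max_m := bsRootB n (pvFuelB n) 0 (n + 1) + 2
  let seeds : List (Int × Int × Int × Int) :=
    [(1, 2, 1, 1)]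
      ++ (PySem.List.pyRange 2 (max_m + 1) 1).map (fun m => (1, m, m, 1))
      ++ [(1, 3, 2, 1)]
      ++ (PySem.List.pyRange 3 (max_m + 1) 1).map (fun m => (1, m, m, -1))
      ++ [(1, 2, 3, -1), (1, 3, 4, -1)]
  seeds.foldl (fun acc t => acc + contribB n t.1 t.2.1 t.2.2.1 t.2.2.2) 0

-- ===== PRECONDITION & SPEC =====
-- A raises TypeError for n < 0 (`n ** 0.25` is a complex number there); Pre_ excludes exactly that.
def Pre_count_regular (n : Int) : Prop := 0 ≤ n
instance (n : Int) : Decidable (Pre_count_regular n) := by unfold Pre_count_regular; infer_instance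
def pvWitness_count_regular : Int := 7

def Spec_count_regular (n : Int) (out : Int) : Prop := out = count_regular_alt n
instance (n : Int) (out : Int) : Decidable (Spec_count_regular n out) := by unfold Spec_count_regular; infer_instance

-- ===== CLAIM (what is proved, stated in full; the proofs are below) =====
def Claim_equal_count_regular : Prop := ∀ (n : Int), Dom_count_regular n → Pre_count_regular n → Spec_count_regular n (count_regular n)

-- ===== LEMMAS AND PROOFS =====

-- reference description of each seed's sequence: tpSeq j = (element #(j+1), element #(j+2))
def tpSeq (a0 a1 m s : Int) : Nat → Int × Int
  | 0 => (a0, a1)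
  | j + 1 => ((tpSeq a0 a1 m s j).2, m * (tpSeq a0 a1 m s j).2 + s * (tpSeq a0 a1 m s j).1)

def ttSeq (a0 a1 m s : Int) (j : Nat) : Int := (tpSeq a0 a1 m s j).2

-- every seed count_regular ever uses satisfies this
def GoodSeed (a0 a1 m s : Int) : Prop :=
  1 ≤ a0 ∧ a0 < a1 ∧ ((s = 1 ∧ 1 ≤ m) ∨ (s = -1 ∧ 3 ≤ m))

theorem tp_grow (a0 a1 m s : Int) (hg : GoodSeed a0 a1 m s) :
    ∀ j, 1 ≤ (tpSeq a0 a1 m s j).1 ∧ (tpSeq a0 a1 m s j).1 < (tpSeq a0 a1 m s j).2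
  | 0 => ⟨hg.1, hg.2.1⟩
  | j + 1 => by
    obtain ⟨h1, h2⟩ := tp_grow a0 a1 m s hg j
    simp only [tpSeq]
    refine ⟨by omega, ?_⟩
    rcases hg.2.2 with ⟨hs, hm⟩ | ⟨hs, hm⟩
    · subst hs
      have hb := mul_le_mul_of_nonneg_right hm (by linarith : (0:Int) ≤ (tpSeq a0 a1 m 1 j).2)
      linarith
    · subst hs
      have hb := mul_le_mul_of_nonneg_right hm (by linarith : (0:Int) ≤ (tpSeq a0 a1 m (-1) j).2)
      linarith

theorem tt_succ (a0 a1 m s : Int) (hg : GoodSeed a0 a1 m s) (j : Nat) :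
    ttSeq a0 a1 m s j < ttSeq a0 a1 m s (j + 1) :=
  (tp_grow a0 a1 m s hg (j + 1)).2

theorem tt_mono (a0 a1 m s : Int) (hg : GoodSeed a0 a1 m s) {j k : Nat} (h : j ≤ k) :
    ttSeq a0 a1 m s j ≤ ttSeq a0 a1 m s k := by
  induction k with
  | zero => simp_all
  | succ k ih =>
    rcases Nat.lt_or_ge j (k + 1) with h' | h'
    · have := tt_succ a0 a1 m s hg k
      have := ih (by omega)
      linarith
    · have : j = k + 1 := by omega
      simp [this]

theorem tt_lb (a0 a1 m s : Int) (hg : GoodSeed a0 a1 m s) (j : Nat) :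
    a1 + j ≤ ttSeq a0 a1 m s j := by
  induction j with
  | zero => simp [ttSeq, tpSeq]
  | succ j ih =>
    have h := tt_succ a0 a1 m s hg j
    push_cast
    push_cast at ih
    omega

theorem tt_lb2 (a0 a1 m s : Int) (hg : GoodSeed a0 a1 m s) (j : Nat) :
    2 + (j : Int) ≤ ttSeq a0 a1 m s j := by
  have := tt_lb a0 a1 m s hg j
  have : (2:Int) ≤ a1 := by obtain ⟨h1, h2, _⟩ := hg; omega
  have := tt_lb a0 a1 m s hg j
  omega

-- characterization of A's scanning loop
theorem scanA_char (n a0 a1 m s : Int) (hg : GoodSeed a0 a1 m s) :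
    ∀ (f j : Nat), n < ttSeq a0 a1 m s (j + f) →
      ∃ jL : Nat, j ≤ jL ∧
        seqLoopA n m s f (tpSeq a0 a1 m s j).1 (tpSeq a0 a1 m s j).2 ((j : Int) + 2)
          = (jL : Int) + 2 ∧
        (jL = j ∨ ttSeq a0 a1 m s jL ≤ n) ∧ n < ttSeq a0 a1 m s (jL + 1)
  | 0, j, hf => by
    refine ⟨j, le_refl _, rfl, Or.inl rfl, ?_⟩
    have h1 := tt_succ a0 a1 m s hg j
    simp only [Nat.add_zero] at hf
    linarith
  | f + 1, j, hf => by
    simp only [seqLoopA]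
    have hnxt : m * (tpSeq a0 a1 m s j).2 + s * (tpSeq a0 a1 m s j).1
        = ttSeq a0 a1 m s (j + 1) := rfl
    split_ifs with hc
    · exact ⟨j, le_refl _, rfl, Or.inl rfl, by rw [← hnxt]; exact hc⟩
    · obtain ⟨jL, hge, heq, hor, hlt⟩ := scanA_char n a0 a1 m s hg f (j + 1)
        (by rw [show j + 1 + f = j + (f + 1) from by omega]; exact hf)
      push_cast at heq
      refine ⟨jL, by omega, ?_, ?_, hlt⟩
      · have e : ((j : Int) + 2) + 1 = (j : Int) + 1 + 2 := by ring
        rw [hnxt, e]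
        exact heq
      · rcases hor with h | h
        · subst h
          exact Or.inr (by rw [← hnxt]; exact not_lt.mp hc)
        · exact Or.inr h

theorem len_unique (a0 a1 m s n : Int) (hg : GoodSeed a0 a1 m s) {j k : Nat}
    (hj1 : j = 0 ∨ ttSeq a0 a1 m s j ≤ n) (hj2 : n < ttSeq a0 a1 m s (j + 1))
    (hk1 : k = 0 ∨ ttSeq a0 a1 m s k ≤ n) (hk2 : n < ttSeq a0 a1 m s (k + 1)) : j = k := by
  by_contra hne
  rcases Nat.lt_or_ge j k with h | h
  · rcases hk1 with h' | h'
    · omega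
    · have := tt_mono a0 a1 m s hg (show j + 1 ≤ k by omega)
      linarith
  · rcases hj1 with h' | h'
    · omega
    · have := tt_mono a0 a1 m s hg (show k + 1 ≤ j by omega)
      linarith

-- matrix power: reference (naive) power and the halving power agree
def npowM (M : Int × Int × Int × Int) : Nat → Int × Int × Int × Int
  | 0 => (1, 0, 0, 1)
  | e + 1 => mmulB M (npowM M e)

theorem mmulB_assoc (X Y Z : Int × Int × Int × Int) :
    mmulB (mmulB X Y) Z = mmulB X (mmulB Y Z) := by
  simp only [mmulB, Prod.mk.injEq]
  refine ⟨by ring, by ring, by ring, by ring⟩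

theorem one_mmulB (X : Int × Int × Int × Int) : mmulB (1, 0, 0, 1) X = X := by
  simp only [mmulB, one_mul, zero_mul, add_zero, zero_add]

theorem npowM_add (M : Int × Int × Int × Int) (a b : Nat) :
    npowM M (a + b) = mmulB (npowM M a) (npowM M b) := by
  induction a with
  | zero => simp [npowM, one_mmulB]
  | succ a ih =>
    have e : a + 1 + b = (a + b) + 1 := by omega
    rw [e]
    show mmulB M (npowM M (a + b)) = mmulB (mmulB M (npowM M a)) (npowM M b)
    rw [ih, mmulB_assoc]

theorem mpowB_eq_npowM (M : Int × Int × Int × Int) :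
    ∀ (f e : Nat), e ≤ f → mpowB f M e = npowM M e
  | 0, e, h => by
    have : e = 0 := by omega
    subst this
    rfl
  | f + 1, e, h => by
    simp only [mpowB]
    split_ifs with h0 h2
    · subst h0; rfl
    · rw [mpowB_eq_npowM M f (e / 2) (by omega)]
      have he : e / 2 + e / 2 = e := by omega
      rw [← npowM_add, he]
    · rw [mpowB_eq_npowM M f (e - 1) (by omega)]
      have he : e = (e - 1) + 1 := by omega
      conv_rhs => rw [he]
      rfl

theorem npow_vec (a0 a1 m s : Int) : ∀ j : Nat,
    (npowM (m, s, 1, 0) j).1 * a1 + (npowM (m, s, 1, 0) j).2.1 * a0 = ttSeq a0 a1 m s j ∧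
    (npowM (m, s, 1, 0) j).2.2.1 * a1 + (npowM (m, s, 1, 0) j).2.2.2 * a0
      = (tpSeq a0 a1 m s j).1
  | 0 => by simp [npowM, ttSeq, tpSeq]
  | j + 1 => by
    obtain ⟨ih1, ih2⟩ := npow_vec a0 a1 m s j
    simp only [npowM, mmulB, ttSeq, tpSeq] at *
    constructor
    · linear_combination m * ih1 + s * ih2
    · linear_combination ih1

theorem termB_eq (a0 a1 m s k : Int) :
    termB a0 a1 m s k = ttSeq a0 a1 m s (k - 2).toNat := by
  unfold termB
  rw [mpowB_eq_npowM _ _ _ (le_refl _)]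
  exact (npow_vec a0 a1 m s (k - 2).toNat).1

-- characterization of B's galloping loop
theorem gallop_char (n a0 a1 m s : Int) (hg : GoodSeed a0 a1 m s) (hn : 0 ≤ n) :
    ∀ (f : Nat) (hi : Int), 3 ≤ hi → hi ≤ 2 * n + 3 →
      n < ttSeq a0 a1 m s ((hi - 2).toNat + f) →
      3 ≤ gallopB n a0 a1 m s f hi ∧ gallopB n a0 a1 m s f hi ≤ 2 * n + 3 ∧
        n < ttSeq a0 a1 m s ((gallopB n a0 a1 m s f hi - 2).toNat)
  | 0, hi, h3, hb, hf => ⟨h3, hb, by simpa using hf⟩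
  | f + 1, hi, h3, hb, hf => by
    simp only [gallopB]
    split_ifs with hc
    · rw [termB_eq] at hc
      have hlow := tt_lb2 a0 a1 m s hg (hi - 2).toNat
      have hhi_le : hi ≤ n := by omega
      refine gallop_char n a0 a1 m s hg hn f (hi * 2) (by omega) (by omega) ?_
      refine lt_of_lt_of_le hf (tt_mono a0 a1 m s hg ?_)
      omega
    · rw [termB_eq] at hc
      exact ⟨h3, hb, by omega⟩

-- characterization of B's binary search
theorem bsLen_char (n a0 a1 m s : Int) (hg : GoodSeed a0 a1 m s) :
    ∀ (f : Nat) (lo hi : Int), 2 ≤ lo → lo < hi →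
      (lo = 2 ∨ ttSeq a0 a1 m s (lo - 2).toNat ≤ n) →
      n < ttSeq a0 a1 m s ((hi - 2).toNat) →
      (hi - lo).toNat ≤ f + 1 →
      2 ≤ bsLenB n a0 a1 m s f lo hi ∧
      (bsLenB n a0 a1 m s f lo hi = 2 ∨
        ttSeq a0 a1 m s (bsLenB n a0 a1 m s f lo hi - 2).toNat ≤ n) ∧
      n < ttSeq a0 a1 m s ((bsLenB n a0 a1 m s f lo hi - 1).toNat)
  | 0, lo, hi, h2, hlt, hP, hQ, hfuel => by
    simp only [bsLenB]
    refine ⟨h2, hP, ?_⟩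
    rw [show (lo - 1).toNat = (hi - 2).toNat from by omega]
    exact hQ
  | f + 1, lo, hi, h2, hlt, hP, hQ, hfuel => by
    simp only [bsLenB]
    split_ifs with hgap hc
    · rw [termB_eq] at hc
      have hme : PySem.Int.floordiv (lo + hi) 2 = (lo + hi) / 2 :=
        PySem.Int.floordiv_eq_ediv_of_pos (by norm_num)
      rw [hme] at hc ⊢
      exact bsLen_char n a0 a1 m s hg f ((lo + hi) / 2) hi (by omega) (by omega)
        (Or.inr hc) hQ (by omega)
    · rw [termB_eq] at hc
      have hme : PySem.Int.floordiv (lo + hi) 2 = (lo + hi) / 2 :=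
        PySem.Int.floordiv_eq_ediv_of_pos (by norm_num)
      rw [hme] at hc ⊢
      exact bsLen_char n a0 a1 m s hg f lo ((lo + hi) / 2) h2 (by omega) hP (by omega)
        (by omega)
    · refine ⟨h2, hP, ?_⟩
      rw [show (lo - 1).toNat = (hi - 2).toNat from by omega]
      exact hQ

-- the two length computations agree on every good seed
theorem seqlen_eq (n a0 a1 m s : Int) (hg : GoodSeed a0 a1 m s) (hn : 0 ≤ n) :
    seq_len_limit a0 a1 m s n = seqLenB n a0 a1 m s := by
  have hcast : (n.toNat : Int) = n := Int.toNat_of_nonneg hn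
  -- A side
  obtain ⟨jA, _, heqA, horA, hltA⟩ := scanA_char n a0 a1 m s hg (pvFuel n) 0
    (by
      have h1 := tt_lb2 a0 a1 m s hg (0 + pvFuel n)
      have h2 : ((0 + pvFuel n : Nat) : Int) = (n.toNat : Int) + 10 := by
        simp only [pvFuel, Nat.zero_add]
        push_cast
        ring
      omega)
  -- B side: gallop
  obtain ⟨hH3, hHb, hHlt⟩ := gallop_char n a0 a1 m s hg hn (pvFuelB n) 3 (by norm_num)
    (by omega)
    (by
      have h1 := tt_lb2 a0 a1 m s hg (((3:Int) - 2).toNat + pvFuelB n)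
      have h2 : ((((3:Int) - 2).toNat + pvFuelB n : Nat) : Int) = 1 + (2 * (n.toNat : Int) + 8) := by
        simp only [pvFuelB]
        push_cast
        norm_num
      omega)
  -- B side: binary search
  obtain ⟨hL2, horB, hltB⟩ := bsLen_char n a0 a1 m s hg (pvFuelB n) 2
    (gallopB n a0 a1 m s (pvFuelB n) 3) (le_refl 2) (by omega) (Or.inl rfl) hHlt
    (by
      have hf : pvFuelB n = 2 * n.toNat + 8 := rfl
      omega)
  set L := bsLenB n a0 a1 m s (pvFuelB n) 2 (gallopB n a0 a1 m s (pvFuelB n) 3) with hLdef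
  -- unify via uniqueness on Nat indices
  have hjeq : jA = (L - 2).toNat := by
    refine len_unique a0 a1 m s n hg horA hltA ?_ ?_
    · rcases horB with h | h
      · left; omega
      · right; exact h
    · rw [show (L - 2).toNat + 1 = (L - 1).toNat from by omega]
      exact hltB
  have hA2 : seq_len_limit a0 a1 m s n = (jA : Int) + 2 := by
    unfold seq_len_limit
    have e0 : (tpSeq a0 a1 m s 0).1 = a0 := rfl
    have e1 : (tpSeq a0 a1 m s 0).2 = a1 := rfl
    rw [← e0, ← e1]
    have e2 : ((0 : Nat) : Int) + 2 = 2 := by norm_num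
    rw [← e2]
    exact heqA
  rw [hA2, hjeq]
  unfold seqLenB
  rw [← hLdef]
  omega

-- A's and B's per-seed contributions agree
theorem contrib_eq (n a0 a1 m s : Int) (hg : GoodSeed a0 a1 m s) (hn : 0 ≤ n) :
    count_seq_from_recurrence a0 a1 m s n = contribB n a0 a1 m s := by
  simp only [count_seq_from_recurrence, contribB]
  rw [seqlen_eq n a0 a1 m s hg hn]

-- A's loop-body form of the contribution equals acc + B's contribution
theorem body_eq (n m s acc : Int) (hg : GoodSeed 1 m m s) (hn : 0 ≤ n) :
    (if seq_len_limit 1 m m s n ≥ 5 then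
        acc + PySem.Int.floordiv ((seq_len_limit 1 m m s n - 4) * (seq_len_limit 1 m m s n - 3)) 2
      else acc)
      = acc + contribB n 1 m m s := by
  simp only [contribB]
  rw [← seqlen_eq n 1 m m s hg hn]
  split_ifs <;> first | rfl | omega

-- ==== the fourth root ====

theorem pow4_mono {a b : Int} (ha : 0 ≤ a) (h : a ≤ b) : pow4 a ≤ pow4 b := by
  have hb : 0 ≤ b := ha.trans h
  have h2 : a * a ≤ b * b := mul_le_mul h h ha hb
  have h4 : a * a * (a * a) ≤ b * b * (b * b) :=
    mul_le_mul h2 h2 (mul_nonneg ha ha) (mul_nonneg hb hb)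
  unfold pow4; nlinarith [h4]

theorem up_stop (n x : Int) (hx : ¬ pow4 (x + 1) ≤ n) : ∀ f, iroot4Up n f x = x
  | 0 => rfl
  | f + 1 => by simp [iroot4Up, hx]

theorem down_stop (n x : Int) (hx : ¬ pow4 x > n) : ∀ f, iroot4Down n f x = x
  | 0 => rfl
  | f + 1 => by simp [iroot4Down, hx]

-- A's iroot4 equals the exact floor fourth root bracket
theorem iroot4_bracket (n : Int) (hn : 0 ≤ n) :
    iroot4 n = Int.ofNat (Nat.sqrt (Nat.sqrt n.toNat)) ∧
    pow4 (Int.ofNat (Nat.sqrt (Nat.sqrt n.toNat))) ≤ n ∧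
    n < pow4 (Int.ofNat (Nat.sqrt (Nat.sqrt n.toNat)) + 1) := by
  set t := Nat.sqrt n.toNat with ht
  set r := Nat.sqrt t with hr
  have h1n : r * r * (r * r) ≤ n.toNat := by
    have a1 : r * r ≤ t := by have := Nat.sqrt_le' t; nlinarith [this]
    have a2 : t * t ≤ n.toNat := by have := Nat.sqrt_le' n.toNat; nlinarith [this]
    calc r * r * (r * r) ≤ t * t := Nat.mul_le_mul a1 a1
      _ ≤ n.toNat := a2
  have h2n : n.toNat < (r + 1) * (r + 1) * ((r + 1) * (r + 1)) := by
    have a1 : t < (r + 1) * (r + 1) := by have := Nat.lt_succ_sqrt' t; nlinarith [this]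
    have a2 : n.toNat < (t + 1) * (t + 1) := by have := Nat.lt_succ_sqrt' n.toNat; nlinarith [this]
    have a3 : t + 1 ≤ (r + 1) * (r + 1) := a1
    calc n.toNat < (t + 1) * (t + 1) := a2
      _ ≤ (r + 1) * (r + 1) * ((r + 1) * (r + 1)) := Nat.mul_le_mul a3 a3
  have hcast : ((n.toNat : Int)) = n := Int.toNat_of_nonneg hn
  have hr1 : pow4 ((r : Nat) : Int) ≤ n := by
    unfold pow4
    have := (Int.ofNat_le.mpr h1n)
    push_cast at this ⊢
    nlinarith [this, hcast]
  have hr2 : n < pow4 (((r : Nat) : Int) + 1) := by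
    unfold pow4
    have := (Int.ofNat_lt.mpr h2n)
    push_cast at this ⊢
    nlinarith [this, hcast]
  have hup : ¬ pow4 (Int.ofNat r + 1) ≤ n := by
    simpa [Int.ofNat_eq_natCast] using not_le.mpr hr2
  have hdown : ¬ pow4 (Int.ofNat r) > n := by
    simpa [Int.ofNat_eq_natCast] using not_lt.mpr hr1
  refine ⟨?_, by simpa [Int.ofNat_eq_natCast] using hr1, by simpa [Int.ofNat_eq_natCast] using hr2⟩
  unfold iroot4
  rw [up_stop n (Int.ofNat r) hup (pvFuel n), down_stop n (Int.ofNat r) hdown (pvFuel n)]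

-- characterization of B's root binary search
theorem bsRoot_char (n : Int) (hn : 0 ≤ n) :
    ∀ (f : Nat) (lo hi : Int), 0 ≤ lo → lo < hi → pow4 lo ≤ n → n < pow4 hi →
      (hi - lo).toNat ≤ f + 1 →
      0 ≤ bsRootB n f lo hi ∧ pow4 (bsRootB n f lo hi) ≤ n ∧
        n < pow4 (bsRootB n f lo hi + 1)
  | 0, lo, hi, h0, hlt, hP, hQ, hfuel => by
    simp only [bsRootB]
    refine ⟨h0, hP, ?_⟩
    rw [show lo + 1 = hi from by omega]
    exact hQ
  | f + 1, lo, hi, h0, hlt, hP, hQ, hfuel => by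
    simp only [bsRootB]
    split_ifs with hgap hc
    · have hme : PySem.Int.floordiv (lo + hi) 2 = (lo + hi) / 2 :=
        PySem.Int.floordiv_eq_ediv_of_pos (by norm_num)
      rw [hme] at hc ⊢
      exact bsRoot_char n hn f ((lo + hi) / 2) hi (by omega) (by omega)
        (show pow4 _ ≤ n from hc) hQ (by omega)
    · have hme : PySem.Int.floordiv (lo + hi) 2 = (lo + hi) / 2 :=
        PySem.Int.floordiv_eq_ediv_of_pos (by norm_num)
      rw [hme] at hc ⊢
      refine bsRoot_char n hn f lo ((lo + hi) / 2) h0 (by omega) hP ?_ (by omega)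
      exact lt_of_not_ge fun h => hc (le_trans (le_of_eq rfl) (le_trans h (le_refl n)))
    · refine ⟨h0, hP, ?_⟩
      rw [show lo + 1 = hi from by omega]
      exact hQ

theorem root_unique {n r1 r2 : Int} (h10 : 0 ≤ r1) (h20 : 0 ≤ r2)
    (h1a : pow4 r1 ≤ n) (h1b : n < pow4 (r1 + 1))
    (h2a : pow4 r2 ≤ n) (h2b : n < pow4 (r2 + 1)) : r1 = r2 := by
  by_contra hne
  rcases lt_or_gt_of_ne hne with h | h
  · have := pow4_mono (by omega : (0:Int) ≤ r1 + 1) (by omega : r1 + 1 ≤ r2)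
    linarith
  · have := pow4_mono (by omega : (0:Int) ≤ r2 + 1) (by omega : r2 + 1 ≤ r1)
    linarith

theorem root_eq (n : Int) (hn : 0 ≤ n) :
    bsRootB n (pvFuelB n) 0 (n + 1) = iroot4 n := by
  have hcast : (n.toNat : Int) = n := Int.toNat_of_nonneg hn
  obtain ⟨hB0, hBa, hBb⟩ := bsRoot_char n hn (pvFuelB n) 0 (n + 1) (le_refl 0)
    (by omega) (by unfold pow4; simpa using hn)
    (by
      have hp : (1:Int) ≤ n + 1 := by omega
      have h1 : n + 1 ≤ (n + 1) * (n + 1) := le_mul_of_one_le_left (by omega) hp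
      have h2 : (n + 1) * (n + 1) ≤ (n + 1) * (n + 1) * ((n + 1) * (n + 1)) :=
        le_mul_of_one_le_left (by nlinarith) (by nlinarith)
      unfold pow4
      nlinarith)
    (by simp only [pvFuelB]; omega)
  obtain ⟨hAe, hAa, hAb⟩ := iroot4_bracket n hn
  rw [hAe]
  have hg0 : (0:Int) ≤ Int.ofNat (Nat.sqrt (Nat.sqrt n.toNat)) := by
    rw [Int.ofNat_eq_natCast]
    exact Int.natCast_nonneg _
  exact root_unique hB0 hg0 hBa hBb hAa hAb

-- good-seed facts for the concrete seeds
theorem good_m_pos (m : Int) (hm : 2 ≤ m) : GoodSeed 1 m m 1 :=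
  ⟨le_refl 1, by omega, Or.inl ⟨rfl, by omega⟩⟩

theorem good_m_neg (m : Int) (hm : 3 ≤ m) : GoodSeed 1 m m (-1) :=
  ⟨le_refl 1, by omega, Or.inr ⟨rfl, by omega⟩⟩

-- the assembled equivalence
theorem count_regular_eq (n : Int) (hn : 0 ≤ n) :
    count_regular n = count_regular_alt n := by
  simp only [count_regular, count_regular_alt, root_eq n hn]
  simp only [List.cons_append, List.nil_append, List.foldl_cons, List.foldl_nil,
    List.foldl_append, List.foldl_map]
  have e1 : ∀ init : Int,
      (PySem.List.pyRange 2 (iroot4 n + 2 + 1) 1).foldl (fun acc m =>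
        if seq_len_limit 1 m m 1 n ≥ 5 then
          acc + PySem.Int.floordiv ((seq_len_limit 1 m m 1 n - 4) * (seq_len_limit 1 m m 1 n - 3)) 2
        else acc) init
      = (PySem.List.pyRange 2 (iroot4 n + 2 + 1) 1).foldl
          (fun acc m => acc + contribB n 1 m m 1) init := by
    intro init
    refine PySem.List.foldl_congr_mem _ _ _ _ ?_
    intro acc m hm
    rw [PySem.List.mem_pyRange_one] at hm
    exact body_eq n m 1 acc (good_m_pos m hm.1) hn
  have e2 : ∀ init : Int,
      (PySem.List.pyRange 3 (iroot4 n + 2 + 1) 1).foldl (fun acc m =>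
        if seq_len_limit 1 m m (-1) n ≥ 5 then
          acc + PySem.Int.floordiv ((seq_len_limit 1 m m (-1) n - 4) * (seq_len_limit 1 m m (-1) n - 3)) 2
        else acc) init
      = (PySem.List.pyRange 3 (iroot4 n + 2 + 1) 1).foldl
          (fun acc m => acc + contribB n 1 m m (-1)) init := by
    intro init
    refine PySem.List.foldl_congr_mem _ _ _ _ ?_
    intro acc m hm
    rw [PySem.List.mem_pyRange_one] at hm
    exact body_eq n m (-1) acc (good_m_neg m hm.1) hn
  rw [e1, e2]
  rw [contrib_eq n 1 2 1 1 ⟨le_refl 1, by norm_num, Or.inl ⟨rfl, by norm_num⟩⟩ hn,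
      contrib_eq n 1 3 2 1 ⟨le_refl 1, by norm_num, Or.inl ⟨rfl, by norm_num⟩⟩ hn,
      contrib_eq n 1 2 3 (-1) ⟨le_refl 1, by norm_num, Or.inr ⟨rfl, by norm_num⟩⟩ hn,
      contrib_eq n 1 3 4 (-1) ⟨le_refl 1, by norm_num, Or.inr ⟨rfl, by norm_num⟩⟩ hn]
  rw [show (0 : Int) + contribB n 1 2 1 1 = contribB n 1 2 1 1 from by ring]

-- ===== VERDICT (by name: the statement is the Claim_ definition above) =====
theorem count_regular_spec : Claim_equal_count_regular := by
  intro n _ hpre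
  exact count_regular_eq n hpre
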